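-- pv_equiv track=rewrite | github.com/yingluosanqian/chh-graduation | Source/Train/parse.py | calc
-- ===== SOURCE A (Python) =====
-- def calc(benchmarks):
--     count = {}
--     for benchmark in benchmarks:
--         name = benchmark.split('//')[1].split('/')[0]
--         if name not in count.keys():
--             count[name] = []
--         count[name].append(benchmark)
--     return count
-- ===== SOURCE B (Python) =====
-- def calc(benchmarks):
--     # Different decomposition: collect the distinct parsed names in first-occurrence
--     # order, then build each group with a filter pass, instead of A's single
--     # insert-or-append dict loop.
--     def key(b):
--         return b.split('//')[1].split('/')[0]
--     names = list(dict.fromkeys(key(b) for b in benchmarks))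
--     return {n: [b for b in benchmarks if key(b) == n] for n in names}
-- ===== Notes on version B (the rewrite author's own statement) =====
-- stated objective: alternative
-- what changed: B replaces A's single-pass insert-or-append dict loop by a two-phase dict comprehension: first the distinct parsed names in first-occurrence order (dict.fromkeys), then one filter pass per name to build its group.
-- outside the precondition, e.g. on calc(['abc']): A raises IndexError, B raises IndexError
import Mathlib
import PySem

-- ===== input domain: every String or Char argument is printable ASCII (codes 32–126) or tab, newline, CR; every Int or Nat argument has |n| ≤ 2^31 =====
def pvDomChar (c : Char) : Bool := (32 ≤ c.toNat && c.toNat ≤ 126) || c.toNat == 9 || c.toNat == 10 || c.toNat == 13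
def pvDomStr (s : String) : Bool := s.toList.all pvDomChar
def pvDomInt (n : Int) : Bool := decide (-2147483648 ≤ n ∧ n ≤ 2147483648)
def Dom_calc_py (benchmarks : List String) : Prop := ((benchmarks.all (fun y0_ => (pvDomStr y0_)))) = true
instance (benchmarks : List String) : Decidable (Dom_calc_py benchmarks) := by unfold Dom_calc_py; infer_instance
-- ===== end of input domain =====

-- B groups benchmarks by first computing the distinct parsed names (first-occurrence order)
-- and then building each group with a filter pass, instead of A's insert-or-append dict loop.


-- ===== PORT A =====
-- benchmark.split('//')[1].split('/')[0]; the '.getD' defaults are only reached where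
-- Python raises IndexError (no '//' in the string), which Pre_calc_py excludes.
def pvKey (b : String) : String :=
  ((PySem.List.pyGet? ((PySem.Str.split? ((PySem.List.pyGet? ((PySem.Str.split? b "//").getD []) 1).getD "") "/").getD []) 0).getD "")

def calc_py (benchmarks : List String) : List (String × List String) :=
  (benchmarks.foldl (fun d b =>
      let name := pvKey b
      let d := if d.contains name then d else d.insert name ([] : List String)
      d.modify name [] (fun v => v ++ [b]))
    (PySem.Dict.empty : PySem.Dict String (List String))).items

-- ===== PORT B =====
def calc_py_alt (benchmarks : List String) : List (String × List String) :=
  let names := PySem.List.dedup (benchmarks.map pvKey)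
  names.map (fun n => (n, benchmarks.filter (fun b => pvKey b == n)))

-- ===== PRECONDITION & SPEC =====
-- Pre_ excludes exactly the inputs where A raises IndexError: a benchmark without '//'
def Pre_calc_py (benchmarks : List String) : Prop :=
  ∀ b ∈ benchmarks, 2 ≤ ((PySem.Str.split? b "//").getD []).length
instance (benchmarks : List String) : Decidable (Pre_calc_py benchmarks) := by
  unfold Pre_calc_py; infer_instance
def pvWitness_calc_py : List String := ["p//a/1", "q//b", "r//a/2"]

def Spec_calc_py (benchmarks : List String) (out : List (String × List String)) : Prop := out = calc_py_alt benchmarks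
instance (benchmarks : List String) (out : List (String × List String)) : Decidable (Spec_calc_py benchmarks out) := by unfold Spec_calc_py; infer_instance

-- ===== CLAIM (what is proved, stated in full; the proofs are below) =====
def Claim_equal_calc_py : Prop := ∀ (benchmarks : List String), Dom_calc_py benchmarks → Pre_calc_py benchmarks → Spec_calc_py benchmarks (calc_py benchmarks)

-- ===== LEMMAS AND PROOFS =====
set_option maxHeartbeats 1000000

-- A's loop body (membership test + insert-empty + append) is exactly a Dict.modify.
theorem pv_step_eq (d : PySem.Dict String (List String)) (b : String) :
    (let name := pvKey b
     let d' := if d.contains name then d else d.insert name ([] : List String)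
     d'.modify name [] (fun v => v ++ [b]))
    = d.modify (pvKey b) [] (fun v => v ++ [b]) := by
  by_cases h : d.contains (pvKey b)
  · simp [h]
  · simp only [Bool.not_eq_true] at h
    simp [h, PySem.Dict.modify, PySem.Dict.getD_insert_self,
      PySem.Dict.insert_insert_self, PySem.Dict.getD_of_not_contains _ _ h]

theorem pv_update_nil {α : Type} [BEq α] [LawfulBEq α] (xs : List α) :
    PySem.Set.update ([] : PySem.Set α) xs = PySem.Set.ofList xs := by
  simp [PySem.Set.update_eq_append_filter, PySem.Set.contains]

-- ===== VERDICT (by name: the statement is the Claim_ definition above) =====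
theorem calc_py_spec : Claim_equal_calc_py := by
  intro benchmarks _ _
  unfold Spec_calc_py calc_py calc_py_alt
  have hfold :
      (benchmarks.foldl (fun d b =>
          let name := pvKey b
          let d := if d.contains name then d else d.insert name ([] : List String)
          d.modify name [] (fun v => v ++ [b]))
        (PySem.Dict.empty : PySem.Dict String (List String)))
      = ((benchmarks.map (fun b => (pvKey b, b))).foldl
          (fun d p => d.modify p.1 [] (fun v => v ++ [p.2]))
          (PySem.Dict.empty : PySem.Dict String (List String))) := by
    rw [List.foldl_map]
    exact PySem.List.foldl_congr_mem _ _ _ _ (fun acc x _ => pv_step_eq acc x)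
  rw [hfold]
  set l := benchmarks.map (fun b => (pvKey b, b)) with hl
  have hkeys :
      ((l.foldl (fun d p => d.modify p.1 [] (fun v => v ++ [p.2]))
        (PySem.Dict.empty : PySem.Dict String (List String)))).keys
      = PySem.Set.ofList (benchmarks.map pvKey) := by
    have := PySem.Dict.keys_foldl_modify_key l (fun p => p.1) ([] : List String)
      (fun d p => fun v => v ++ [p.2]) (PySem.Dict.empty : PySem.Dict String (List String))
    simpa [hl, PySem.Dict.keys_empty, pv_update_nil, List.map_map, Function.comp] using this
  have hnodup :
      ((l.foldl (fun d p => d.modify p.1 [] (fun v => v ++ [p.2]))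
        (PySem.Dict.empty : PySem.Dict String (List String)))).keys.Nodup := by
    exact PySem.Dict.nodup_keys_foldl_modify_key l (fun p => p.1) ([] : List String)
      (fun d p => fun v => v ++ [p.2]) _ (by simp [PySem.Dict.keys_empty])
  rw [PySem.Dict.items_eq_map_keys _ hnodup ([] : List String), hkeys,
    PySem.List.dedup_eq_ofList]
  apply List.map_congr_left
  intro n _
  have hg := PySem.Dict.getD_foldl_modify_append l
    (PySem.Dict.empty : PySem.Dict String (List String)) n
  simp only [hl] at hg ⊢
  rw [hg]
  simp [PySem.Dict.getD_empty, List.filter_map, List.map_map, Function.comp_def]
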